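-- pv_equiv track=rewrite | github.com/minseunghwang/Algorithm | TEST/liner/liner5.py | solution
-- ===== SOURCE A (Python) =====
-- import operator
--
-- def solution(dataSource, tags):
--     answer = []
--     dict = {}
--     for data in dataSource:
--         cnt = 0
--         for i in data[1:]:
--             if i in tags:
--                 cnt += 1
--         if cnt != 0:
--             dict[data[0]] = cnt
--
--     sdict = sorted(dict.items(), key = operator.itemgetter(1), reverse=True)
--     for i in sdict[:10]:
--         answer.append(i[0])
--     return answer
-- ===== SOURCE B (Python) =====
-- def solution(dataSource, tags):
--     counts = {}
--     for row in dataSource: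
--         cnt = sum(1 for x in row[1:] if x in tags)
--         if cnt != 0:
--             counts[row[0]] = cnt
--     # streaming bounded top-10: keep a descending (stable) list of at most 10 items
--     top = []
--     for item in counts.items():
--         i = 0
--         while i < len(top) and top[i][1] >= item[1]:
--             i += 1
--         top.insert(i, item)
--         if len(top) > 10:
--             top.pop()
--     return [p[0] for p in top]
-- ===== Notes on version B (the rewrite author's own statement) =====
-- stated objective: alternative
-- what changed: The sort-then-slice selection (sorted(dict.items(), key=count, reverse=True)[:10]) is replaced by a streaming bounded top-k pass that maintains a stable descending list of at most 10 items by positional insertion, and the inner counting loop becomes a sum over a filtered generator.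
import Mathlib
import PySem

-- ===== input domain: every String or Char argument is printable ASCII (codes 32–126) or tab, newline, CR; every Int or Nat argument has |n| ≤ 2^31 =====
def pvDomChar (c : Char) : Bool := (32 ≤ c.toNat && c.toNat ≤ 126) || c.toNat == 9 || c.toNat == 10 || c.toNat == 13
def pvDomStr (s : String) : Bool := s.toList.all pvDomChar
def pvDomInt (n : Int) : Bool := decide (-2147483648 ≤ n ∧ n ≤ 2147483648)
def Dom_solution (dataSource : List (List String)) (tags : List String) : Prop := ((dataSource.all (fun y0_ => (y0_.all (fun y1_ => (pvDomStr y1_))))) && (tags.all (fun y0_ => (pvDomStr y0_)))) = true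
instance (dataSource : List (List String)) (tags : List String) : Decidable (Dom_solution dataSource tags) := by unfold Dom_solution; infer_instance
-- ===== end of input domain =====

-- B replaces the full reverse sort + slice by a streaming bounded top-10 insertion pass (alternative selection algorithm, same results).

-- ===== PORT A =====
-- data[0] is only evaluated under cnt ≠ 0, which forces data ≠ []; the none branch of pyGet? is unreachable.
def solution (dataSource : List (List String)) (tags : List String) : List String :=
  let d : PySem.Dict String Int := dataSource.foldl (fun d data =>
    let cnt : Int := (PySem.List.slice data (some 1) none).foldl
      (fun cnt i => if tags.contains i then cnt + 1 else cnt) 0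
    if cnt ≠ 0 then
      match PySem.List.pyGet? data 0 with
      | some k => d.insert k cnt
      | none => d
    else d) PySem.Dict.empty
  let sdict := PySem.List.sorted d.items (fun p => p.2) true
  (PySem.List.slice sdict none (some 10)).foldl (fun answer i => answer ++ [i.1]) []

-- ===== PORT B =====
-- the while-loop positional insert of Source B: skip entries with count ≥ item's, insert there
def insertDesc (x : String × Int) : List (String × Int) → List (String × Int)
  | [] => [x]
  | y :: t => if x.2 ≤ y.2 then y :: insertDesc x t else x :: y :: t

def solution_alt (dataSource : List (List String)) (tags : List String) : List String :=
  let counts : PySem.Dict String Int := dataSource.foldl (fun d row =>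
    let cnt : Int := ((PySem.List.slice row (some 1) none).countP (fun x => tags.contains x) : Nat)
    if cnt ≠ 0 then
      match PySem.List.pyGet? row 0 with
      | some k => d.insert k cnt
      | none => d
    else d) PySem.Dict.empty
  let top := counts.items.foldl (fun top item =>
    let t := insertDesc item top
    if 10 < t.length then t.dropLast else t) []
  top.map (fun p => p.1)

-- ===== PRECONDITION & SPEC =====
def Spec_solution (dataSource : List (List String)) (tags : List String) (out : List String) : Prop := out = solution_alt dataSource tags
instance (dataSource : List (List String)) (tags : List String) (out : List String) : Decidable (Spec_solution dataSource tags out) := by unfold Spec_solution; infer_instance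

-- ===== CLAIM (what is proved, stated in full; the proofs are below) =====
def Claim_equal_solution : Prop := ∀ (dataSource : List (List String)) (tags : List String), Dom_solution dataSource tags → Spec_solution dataSource tags (solution dataSource tags)

-- ===== LEMMAS AND PROOFS =====

-- xs[:10] at the Int literal 10 (specialization of PySem.List.slice_to so rw matches)
theorem slice_ten {α : Type} (xs : List α) : PySem.List.slice xs none (some 10) = xs.take 10 :=
  PySem.List.slice_to xs (by norm_num)

-- Source B's positional insert is PySem's insertBy for the descending-by-count order
theorem insertDesc_eq_insertBy (x : String × Int) (l : List (String × Int)) :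
    insertDesc x l = PySem.List.insertBy (fun a b => decide (b.2 < a.2)) x l := by
  induction l with
  | nil => simp [insertDesc, PySem.List.insertBy]
  | cons y t ih =>
      by_cases h : x.2 ≤ y.2 <;>
        simp [insertDesc, PySem.List.insertBy, h, ih]

theorem length_insertBy {α : Type} (b : α → α → Bool) (x : α) (l : List α) :
    (PySem.List.insertBy b x l).length = l.length + 1 := by
  induction l with
  | nil => simp [PySem.List.insertBy]
  | cons y t ih =>
      by_cases h : b x y <;> simp [PySem.List.insertBy, h, ih]

-- truncation commutes with insertion: inserting into the kept prefix and re-truncating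
-- gives the truncation of the full insertion
theorem take_insertBy_take {α : Type} (b : α → α → Bool) (x : α) :
    ∀ (l : List α) (k : Nat),
      (PySem.List.insertBy b x (l.take k)).take k = (PySem.List.insertBy b x l).take k := by
  intro l
  induction l with
  | nil => intro k; simp
  | cons y t ih =>
      intro k
      match k with
      | 0 => rfl
      | Nat.succ k' =>
          by_cases h : b x y
          · simp only [PySem.List.insertBy, h, if_pos, List.take_succ_cons]
            cases k' with
            | zero => rfl
            | succ j =>
                simp [List.take_succ_cons, List.take_take]
          · simp [PySem.List.insertBy, h, List.take_succ_cons, ih k']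

-- the streaming bounded fold computes the truncation of the full insertion fold
theorem foldl_trunc_step (bf : (String × Int) → (String × Int) → Bool) :
    ∀ (items : List (String × Int)) (acc : List (String × Int)),
      items.foldl (fun top item =>
          let t := PySem.List.insertBy bf item top
          if 10 < t.length then t.dropLast else t) (acc.take 10)
        = (items.foldl (fun acc x => PySem.List.insertBy bf x acc) acc).take 10 := by
  intro items
  induction items with
  | nil => intro acc; rfl
  | cons x rest ih =>
      intro acc
      have hstep :
          (let t := PySem.List.insertBy bf x (acc.take 10)
           if 10 < t.length then t.dropLast else t)
            = (PySem.List.insertBy bf x acc).take 10 := by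
        have htake := take_insertBy_take bf x acc 10
        by_cases h : 10 < (PySem.List.insertBy bf x (acc.take 10)).length
        · have hlen : (PySem.List.insertBy bf x (acc.take 10)).length = 11 := by
            have h1 := length_insertBy bf x (acc.take 10)
            have h2 : (acc.take 10).length ≤ 10 := by
              simp [List.length_take]
            omega
          have : (PySem.List.insertBy bf x (acc.take 10)).dropLast
              = (PySem.List.insertBy bf x (acc.take 10)).take 10 := by
            rw [List.dropLast_eq_take, hlen]
          simp only [h, if_pos, this, htake]
        · have hle : (PySem.List.insertBy bf x (acc.take 10)).length ≤ 10 := by omega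
          have : (PySem.List.insertBy bf x (acc.take 10)).take 10
              = PySem.List.insertBy bf x (acc.take 10) := List.take_of_length_le hle
          simp only [h, if_neg, not_false_iff, ← htake, this]
      simp only [List.foldl_cons, hstep, ih (PySem.List.insertBy bf x acc)]

-- the two dict-building folds are the same function (0 + countP = countP)
theorem count_fold_eq (tags : List String) (data : List String) :
    (PySem.List.slice data (some 1) none).foldl
      (fun cnt i => if tags.contains i then cnt + 1 else cnt) (0 : Int)
    = (((PySem.List.slice data (some 1) none).countP (fun x => tags.contains x) : Nat) : Int) := by
  rw [PySem.List.foldl_if_add_one]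
  simp only [zero_add]

-- ===== VERDICT (by name: the statement is the Claim_ definition above) =====
theorem solution_spec : Claim_equal_solution := by
  intro dataSource tags _
  show solution dataSource tags = solution_alt dataSource tags
  unfold solution solution_alt
  simp only [count_fold_eq]
  have hins : ∀ (top : List (String × Int)) (item : String × Int),
      (let t := insertDesc item top
       if 10 < t.length then t.dropLast else t)
      = (let t := PySem.List.insertBy (fun a b => decide (b.2 < a.2)) item top
         if 10 < t.length then t.dropLast else t) := by
    intro top item
    simp only [insertDesc_eq_insertBy]
  simp only [hins]
  rw [PySem.List.sorted_rev_eq_foldl_insertBy]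
  rw [slice_ten]
  rw [PySem.List.foldl_append_singleton_eq_map]
  rw [show ([] : List (String × Int)) = ([] : List (String × Int)).take 10 from rfl,
    foldl_trunc_step]
  simp
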